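-- pv_equiv track=rewrite | github.com/pypi-data/pypi-mirror-361 | packages/ctfatsegment/ctfatsegment-0.2.0-py3-none-any.whl/ctfatsegment2/ctfat_segment.py | smoothRightBorder
-- ===== SOURCE A (Python) =====
-- import copy
--
-- def smoothSideBorder(border):
--     rows = []
--     row = []
--     for i in range(0, len(border)-1):
--         if border[i][0] > border[i+1][0] - 8 and border[i][0] < border[i+1][0] + 8:
--             row.append(border[i])
--             if i == len(border)-2:
--                 row.append(border[i+1])
--                 c = copy.deepcopy(row)
--                 rows.append(c)
--         else:
--             row.append(border[i])
--             c = copy.deepcopy(row)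
--             rows.append(c)
--             row.clear()
--
--     #serie = max(rows, key=len)
--
--     smoothedBorder = []
--     for row in rows:
--         if len(row) > 4:
--             for point in row:
--                 smoothedBorder.append(point)
--
--     return smoothedBorder
--
-- def smoothRightBorder(borderRight):
--     borderRight2 = []
--     if borderRight[0][0] < borderRight[1][0] + 8 and borderRight[0][0] > borderRight[1][0] + 1:
--         borderRight2.append(borderRight[0])
--
--     for i in range(1, len(borderRight)-1):
--         if borderRight[i][0] > borderRight[i-1][0] + 1 and borderRight[i][0] > borderRight[i+1][0] + 1:
--             continue
--         if borderRight[i][0] < borderRight[i-1][0] - 1 and borderRight[i][0] < borderRight[i+1][0] - 1: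
--             continue
--         borderRight2.append(borderRight[i])
--
--     if borderRight[len(borderRight)-1][0] < borderRight[len(borderRight)-2][0] + 8 and borderRight[len(borderRight)-1][0] > borderRight[len(borderRight)-2][0] - 1:
--         borderRight2.append(borderRight[len(borderRight)-1])
--
--     return smoothSideBorder(borderRight2)
-- ===== SOURCE B (Python) =====
-- def smoothRightBorder(borderRight):
--     n = len(borderRight)
--
--     def keep(i):
--         x = borderRight[i][0]
--         if i == 0:
--             return borderRight[1][0] + 1 < x < borderRight[1][0] + 8
--         if i == n - 1:
--             return borderRight[n - 2][0] - 1 < x < borderRight[n - 2][0] + 8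
--         up = x > borderRight[i - 1][0] + 1 and x > borderRight[i + 1][0] + 1
--         down = x < borderRight[i - 1][0] - 1 and x < borderRight[i + 1][0] - 1
--         return not up and not down
--
--     pts = [borderRight[i] for i in range(n) if keep(i)]
--     cuts = [0] + [j + 1 for j in range(len(pts) - 1)
--                   if abs(pts[j][0] - pts[j + 1][0]) >= 8] + [len(pts)]
--     return [p for a, b in zip(cuts, cuts[1:]) if b - a > 4 for p in pts[a:b]]
-- ===== Notes on version B (the rewrite author's own statement) =====
-- stated objective: simpler
-- what changed: B replaces A's three separate stateful loops (conditional head/tail appends, a spike-filter loop, and a grouping loop that deep-copies a growing row buffer) by a declarative three-stage pipeline: a single index predicate keep(i) covering all three filter cases, a list of cut positions where neighbouring kept points are >= 8 apart, and slicing between consecutive cuts keeping slices longer than 4.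
import Mathlib
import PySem

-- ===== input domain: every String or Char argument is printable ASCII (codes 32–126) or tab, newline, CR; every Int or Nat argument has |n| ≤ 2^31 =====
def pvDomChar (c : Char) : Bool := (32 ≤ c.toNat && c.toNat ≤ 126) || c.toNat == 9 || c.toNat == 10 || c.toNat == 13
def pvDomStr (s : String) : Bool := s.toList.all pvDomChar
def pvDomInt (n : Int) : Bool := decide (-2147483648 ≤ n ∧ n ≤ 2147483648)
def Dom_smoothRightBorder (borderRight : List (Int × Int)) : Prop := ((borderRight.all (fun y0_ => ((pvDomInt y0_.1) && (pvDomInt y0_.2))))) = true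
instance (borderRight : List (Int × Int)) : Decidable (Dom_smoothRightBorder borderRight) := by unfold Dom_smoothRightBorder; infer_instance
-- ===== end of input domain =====

-- B replaces A's stateful loops (deep-copied row buffers) by a declarative pipeline: one index
-- predicate selecting the kept points, then cut positions, then slicing; simpler, same O(n) cost.

-- ===== PORT A =====
def pvD : Int × Int := (0, 0)

def smoothSideBorderA (border : List (Int × Int)) : List (Int × Int) :=
  let n : Int := PySem.List.len border
  let st := (PySem.List.pyRange 0 (n - 1) 1).foldl
    (fun (st : List (List (Int × Int)) × List (Int × Int)) i =>
      let rows := st.1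
      let row := st.2
      let bi := PySem.List.pyGetD border i pvD
      let bi1 := PySem.List.pyGetD border (i + 1) pvD
      if bi.1 > bi1.1 - 8 ∧ bi.1 < bi1.1 + 8 then
        let row := row ++ [bi]
        if i = n - 2 then
          let row := row ++ [bi1]
          (rows ++ [row], row)
        else (rows, row)
      else (rows ++ [row ++ [bi]], ([] : List (Int × Int)))) ([], [])
  st.1.foldl (fun acc row =>
    if PySem.List.len row > 4 then row.foldl (fun a p => a ++ [p]) acc else acc) []

def smoothRightBorder (borderRight : List (Int × Int)) : List (Int × Int) :=
  let n : Int := PySem.List.len borderRight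
  let b0 := PySem.List.pyGetD borderRight 0 pvD
  let b1 := PySem.List.pyGetD borderRight 1 pvD
  let br2 : List (Int × Int) := if b0.1 < b1.1 + 8 ∧ b0.1 > b1.1 + 1 then [b0] else []
  let br2 := (PySem.List.pyRange 1 (n - 1) 1).foldl
    (fun acc i =>
      let p := PySem.List.pyGetD borderRight i pvD
      let pm := PySem.List.pyGetD borderRight (i - 1) pvD
      let pp := PySem.List.pyGetD borderRight (i + 1) pvD
      if p.1 > pm.1 + 1 ∧ p.1 > pp.1 + 1 then acc
      else if p.1 < pm.1 - 1 ∧ p.1 < pp.1 - 1 then acc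
      else acc ++ [p]) br2
  let lastp := PySem.List.pyGetD borderRight (n - 1) pvD
  let pen := PySem.List.pyGetD borderRight (n - 2) pvD
  let br2 := if lastp.1 < pen.1 + 8 ∧ lastp.1 > pen.1 - 1 then br2 ++ [lastp] else br2
  smoothSideBorderA br2

-- ===== PORT B =====
-- keep(i) of Source B: one predicate on the index deciding whether borderRight[i] survives the spike filter
def keepB (l : List (Int × Int)) (n i : Int) : Bool :=
  if i = 0 then
    decide ((PySem.List.pyGetD l 1 pvD).1 + 1 < (PySem.List.pyGetD l i pvD).1 ∧
            (PySem.List.pyGetD l i pvD).1 < (PySem.List.pyGetD l 1 pvD).1 + 8)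
  else if i = n - 1 then
    decide ((PySem.List.pyGetD l (n - 2) pvD).1 - 1 < (PySem.List.pyGetD l i pvD).1 ∧
            (PySem.List.pyGetD l i pvD).1 < (PySem.List.pyGetD l (n - 2) pvD).1 + 8)
  else
    decide (¬((PySem.List.pyGetD l i pvD).1 > (PySem.List.pyGetD l (i - 1) pvD).1 + 1 ∧
              (PySem.List.pyGetD l i pvD).1 > (PySem.List.pyGetD l (i + 1) pvD).1 + 1) ∧
            ¬((PySem.List.pyGetD l i pvD).1 < (PySem.List.pyGetD l (i - 1) pvD).1 - 1 ∧
              (PySem.List.pyGetD l i pvD).1 < (PySem.List.pyGetD l (i + 1) pvD).1 - 1))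

-- cuts of Source B: [0] + [j+1 for j in range(len(pts)-1) if abs(...) >= 8] + [len(pts)]
def cutsB (pts : List (Int × Int)) : List Int :=
  0 :: ((PySem.List.pyRange 0 (PySem.List.len pts - 1) 1).filter
          (fun j => decide (8 ≤ |(PySem.List.pyGetD pts j pvD).1 - (PySem.List.pyGetD pts (j + 1) pvD).1|))).map (· + 1)
    ++ [PySem.List.len pts]

def smoothRightBorder_alt (borderRight : List (Int × Int)) : List (Int × Int) :=
  let n := PySem.List.len borderRight
  let pts := ((PySem.List.pyRange 0 n 1).filter (keepB borderRight n)).map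
      (fun i => PySem.List.pyGetD borderRight i pvD)
  let cuts := cutsB pts
  ((cuts.zip cuts.tail).filter (fun ab => decide (ab.2 - ab.1 > 4))).flatMap
    (fun ab => PySem.List.slice pts (some ab.1) (some ab.2))

-- ===== PRECONDITION & SPEC =====
-- Pre_ excludes lists of fewer than two points, on which A raises IndexError.
def Pre_smoothRightBorder (borderRight : List (Int × Int)) : Prop := 2 ≤ borderRight.length
instance (borderRight : List (Int × Int)) : Decidable (Pre_smoothRightBorder borderRight) := by
  unfold Pre_smoothRightBorder; infer_instance

def pvWitness_smoothRightBorder : (List (Int × Int)) := [(3, 0), (4, 1), (5, 2), (6, 3), (7, 4)]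

def Spec_smoothRightBorder (borderRight : List (Int × Int)) (out : List (Int × Int)) : Prop := out = smoothRightBorder_alt borderRight
instance (borderRight : List (Int × Int)) (out : List (Int × Int)) : Decidable (Spec_smoothRightBorder borderRight out) := by unfold Spec_smoothRightBorder; infer_instance

-- ===== CLAIM (what is proved, stated in full; the proofs are below) =====
def Claim_equal_smoothRightBorder : Prop := ∀ (borderRight : List (Int × Int)), Dom_smoothRightBorder borderRight → Pre_smoothRightBorder borderRight → Spec_smoothRightBorder borderRight (smoothRightBorder borderRight)

-- ===== LEMMAS AND PROOFS =====

-- the "close" predicate of the grouping: |a.1 - b.1| < 8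
abbrev closeP (a b : Int × Int) : Prop := a.1 > b.1 - 8 ∧ a.1 < b.1 + 8
-- the "far" test of Source B's cut positions
def farB (a b : Int × Int) : Bool := decide (8 ≤ |a.1 - b.1|)

theorem farB_false_iff (a b : Int × Int) : farB a b = false ↔ closeP a b := by
  unfold farB closeP
  rw [decide_eq_false_iff_not, not_le, abs_lt]
  omega

-- reference recursion for A's grouping loop (rows emitted, pending row as accumulator)
def loopA : List (Int × Int) → List (Int × Int) → List (List (Int × Int))
  | [], _ => []
  | [_], _ => []
  | [a, b], row => if closeP a b then [row ++ [a] ++ [b]] else [row ++ [a]]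
  | a :: b :: c :: t, row =>
      if closeP a b then loopA (b :: c :: t) (row ++ [a])
      else (row ++ [a]) :: loopA (b :: c :: t) []

-- forward recursion over the segment currently being built (row ++ [a], last element a)
def loopB : List (Int × Int) → List (Int × Int) → (Int × Int) → List (List (Int × Int))
  | [], row, a => [row ++ [a]]
  | p :: t, row, a =>
      if closeP a p then loopB t (row ++ [a]) p else (row ++ [a]) :: loopB t [] p

-- B's segmentation, written back-to-front: segments of consecutive close points
def segsRef : List (Int × Int) → List (List (Int × Int))
  | [] => [[]]
  | [p] => [[p]]
  | p :: q :: t =>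
      if farB p q then [p] :: segsRef (q :: t)
      else match segsRef (q :: t) with
        | [] => [[p]]
        | s :: ss => (p :: s) :: ss

theorem pyGetD_cons_shift (x : Int × Int) (xs : List (Int × Int)) (i : Int) (h : 0 ≤ i) :
    PySem.List.pyGetD (x :: xs) (i + 1) pvD = PySem.List.pyGetD xs i pvD := by
  obtain ⟨m, rfl⟩ := Int.eq_ofNat_of_zero_le h
  have : ((m : Int) + 1) = ((m + 1 : Nat) : Int) := by push_cast; omega
  rw [this, PySem.List.pyGetD_natCast, PySem.List.pyGetD_natCast]
  rfl

theorem foldl_pyRange_shift {α : Type} (f : α → Int → α) (a b : Int) (init : α) :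
    (PySem.List.pyRange (a + 1) (b + 1) 1).foldl f init
      = (PySem.List.pyRange a b 1).foldl (fun acc i => f acc (i + 1)) init := by
  rw [PySem.List.pyRange_one, PySem.List.pyRange_one]
  have h : (b + 1 - (a + 1)) = b - a := by omega
  rw [h, List.foldl_map, List.foldl_map]
  have hf : (fun (acc : α) (k : Nat) => f acc (a + 1 + (k : Int))) = fun (acc : α) (k : Nat) => f acc (a + (k : Int) + 1) := by
    funext acc k; congr 1; omega
  rw [hf]

theorem pyRange_shift_one (b : Int) :
    PySem.List.pyRange 1 (b + 1) 1 = (PySem.List.pyRange 0 b 1).map (· + 1) := by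
  rw [PySem.List.pyRange_one, PySem.List.pyRange_one, List.map_map]
  have h : (b + 1 - 1) = b - 0 := by omega
  rw [h]
  congr 1
  funext k
  simp
  omega

-- named copies of the fold bodies of the ports (definitionally equal to the lambdas in the ports)
def stepA (l : List (Int × Int)) (st : List (List (Int × Int)) × List (Int × Int)) (i : Int) :
    List (List (Int × Int)) × List (Int × Int) :=
  let rows := st.1
  let row := st.2
  let bi := PySem.List.pyGetD l i pvD
  let bi1 := PySem.List.pyGetD l (i + 1) pvD
  if bi.1 > bi1.1 - 8 ∧ bi.1 < bi1.1 + 8 then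
    let row := row ++ [bi]
    if i = PySem.List.len l - 2 then
      let row := row ++ [bi1]
      (rows ++ [row], row)
    else (rows, row)
  else (rows ++ [row ++ [bi]], ([] : List (Int × Int)))

def stepM (l : List (Int × Int)) (acc : List (Int × Int)) (i : Int) : List (Int × Int) :=
  let p := PySem.List.pyGetD l i pvD
  let pm := PySem.List.pyGetD l (i - 1) pvD
  let pp := PySem.List.pyGetD l (i + 1) pvD
  if p.1 > pm.1 + 1 ∧ p.1 > pp.1 + 1 then acc
  else if p.1 < pm.1 - 1 ∧ p.1 < pp.1 - 1 then acc
  else acc ++ [p]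

def headA (l : List (Int × Int)) : List (Int × Int) :=
  if (PySem.List.pyGetD l 0 pvD).1 < (PySem.List.pyGetD l 1 pvD).1 + 8 ∧
     (PySem.List.pyGetD l 0 pvD).1 > (PySem.List.pyGetD l 1 pvD).1 + 1 then [PySem.List.pyGetD l 0 pvD] else []

def stage1A (l : List (Int × Int)) : List (Int × Int) :=
  if (PySem.List.pyGetD l (PySem.List.len l - 1) pvD).1 < (PySem.List.pyGetD l (PySem.List.len l - 2) pvD).1 + 8 ∧
     (PySem.List.pyGetD l (PySem.List.len l - 1) pvD).1 > (PySem.List.pyGetD l (PySem.List.len l - 2) pvD).1 - 1 then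
    (PySem.List.pyRange 1 (PySem.List.len l - 1) 1).foldl (stepM l) (headA l)
      ++ [PySem.List.pyGetD l (PySem.List.len l - 1) pvD]
  else (PySem.List.pyRange 1 (PySem.List.len l - 1) 1).foldl (stepM l) (headA l)

theorem smoothRightBorder_def (l : List (Int × Int)) :
    smoothRightBorder l = smoothSideBorderA (stage1A l) := rfl

theorem smoothSideBorderA_eq_fold (l : List (Int × Int)) :
    smoothSideBorderA l
      = (((PySem.List.pyRange 0 (PySem.List.len l - 1) 1).foldl (stepA l) ([], [])).1).foldl
          (fun acc row => if PySem.List.len row > 4 then row.foldl (fun a p => a ++ [p]) acc else acc) [] := rfl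

-- A's grouping fold equals the reference recursion loopA
theorem foldA_eq_loopA : ∀ (l : List (Int × Int)) (rows : List (List (Int × Int))) (row : List (Int × Int)),
    ((PySem.List.pyRange 0 (PySem.List.len l - 1) 1).foldl (stepA l) (rows, row)).1
      = rows ++ loopA l row := by
  intro l
  induction l with
  | nil =>
    intro rows row
    rw [show PySem.List.len ([] : List (Int × Int)) - 1 = -1 by simp [PySem.List.len_eq]]
    rw [PySem.List.pyRange_one_eq_nil (by omega)]
    simp [loopA]
  | cons a t IH =>
    cases t with
    | nil =>
      intro rows row
      rw [show PySem.List.len [a] - 1 = 0 by simp [PySem.List.len_eq]]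
      rw [PySem.List.pyRange_one_eq_nil (by omega)]
      simp [loopA]
    | cons b t' =>
      intro rows row
      have hlen : PySem.List.len (a :: b :: t') = (t'.length : Int) + 2 := by
        rw [PySem.List.len_eq]; simp; omega
      have hlen2 : PySem.List.len (b :: t') = (t'.length : Int) + 1 := by
        rw [PySem.List.len_eq]; simp
      rw [PySem.List.pyRange_one_cons (by omega), List.foldl_cons]
      have hshift : ∀ (st : List (List (Int × Int)) × List (Int × Int)),
          (PySem.List.pyRange 1 (PySem.List.len (a :: b :: t') - 1) 1).foldl (stepA (a :: b :: t')) st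
            = (PySem.List.pyRange 0 (PySem.List.len (b :: t') - 1) 1).foldl (stepA (b :: t')) st := by
        intro st
        have hr : PySem.List.pyRange 1 (PySem.List.len (a :: b :: t') - 1) 1
            = PySem.List.pyRange (0 + 1) ((PySem.List.len (b :: t') - 1) + 1) 1 := by
          congr 1
          omega
        rw [hr, foldl_pyRange_shift]
        apply PySem.List.foldl_congr_mem
        intro acc i hi
        have hi' := (PySem.List.mem_pyRange_one).1 hi
        unfold stepA
        rw [pyGetD_cons_shift a (b :: t') i hi'.1,
            pyGetD_cons_shift a (b :: t') (i + 1) (by omega)]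
        simp only [show ((i + 1 = PySem.List.len (a :: b :: t') - 2)) ↔ ((i = PySem.List.len (b :: t') - 2))
              from by constructor <;> intro h <;> omega]
      simp only [zero_add]
      rw [hshift]
      have hbi1 : PySem.List.pyGetD (a :: b :: t') (0 + 1) pvD = b := by
        rw [pyGetD_cons_shift a (b :: t') 0 le_rfl]
        exact PySem.List.pyGetD_zero_cons _ _ _
      by_cases hc : closeP a b
      · have hc' : (PySem.List.pyGetD (a :: b :: t') 0 pvD).1 > (PySem.List.pyGetD (a :: b :: t') (0 + 1) pvD).1 - 8 ∧
            (PySem.List.pyGetD (a :: b :: t') 0 pvD).1 < (PySem.List.pyGetD (a :: b :: t') (0 + 1) pvD).1 + 8 := by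
          rw [hbi1, PySem.List.pyGetD_zero_cons]; exact hc
        cases t' with
        | nil =>
          have h0 : (0 : Int) = PySem.List.len (a :: b :: ([] : List (Int × Int))) - 2 := by
            rw [hlen]; simp
          rw [show stepA (a :: b :: ([] : List (Int × Int))) (rows, row) 0
                = (rows ++ [row ++ [a] ++ [b]], row ++ [a] ++ [b]) by
            unfold stepA; rw [if_pos hc', if_pos h0, hbi1, PySem.List.pyGetD_zero_cons]]
          rw [IH (rows ++ [row ++ [a] ++ [b]]) (row ++ [a] ++ [b])]
          simp [loopA, hc]
        | cons c t'' =>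
          have h0 : ¬ ((0 : Int) = PySem.List.len (a :: b :: c :: t'') - 2) := by
            rw [PySem.List.len_eq]; simp; omega
          rw [show stepA (a :: b :: c :: t'') (rows, row) 0 = (rows, row ++ [a]) by
            unfold stepA; rw [if_pos hc', if_neg h0, PySem.List.pyGetD_zero_cons]]
          rw [IH rows (row ++ [a])]
          simp [loopA, hc]
      · have hc' : ¬ ((PySem.List.pyGetD (a :: b :: t') 0 pvD).1 > (PySem.List.pyGetD (a :: b :: t') (0 + 1) pvD).1 - 8 ∧
            (PySem.List.pyGetD (a :: b :: t') 0 pvD).1 < (PySem.List.pyGetD (a :: b :: t') (0 + 1) pvD).1 + 8) := by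
          rw [hbi1, PySem.List.pyGetD_zero_cons]; exact hc
        rw [show stepA (a :: b :: t') (rows, row) 0 = (rows ++ [row ++ [a]], []) by
          unfold stepA; rw [if_neg hc', PySem.List.pyGetD_zero_cons]]
        rw [IH (rows ++ [row ++ [a]]) []]
        cases t' with
        | nil => simp [loopA, hc]
        | cons c t'' => simp [loopA, hc]

theorem flatMap_ite_eq_filter_flatten (p : List (Int × Int) → Bool) (L : List (List (Int × Int))) :
    L.flatMap (fun r => if p r then r else []) = (L.filter p).flatten := by
  induction L with
  | nil => rfl
  | cons r L IH =>
    by_cases h : p r <;> simp [List.flatMap_cons, h, IH]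

-- A's smoothSideBorder equals filter-and-flatten of loopA
theorem smoothSideBorderA_eq (l : List (Int × Int)) :
    smoothSideBorderA l
      = ((loopA l []).filter (fun r => decide (PySem.List.len r > 4))).flatten := by
  rw [smoothSideBorderA_eq_fold, foldA_eq_loopA l [] []]
  rw [show (fun (acc row : List (Int × Int)) =>
        if PySem.List.len row > 4 then row.foldl (fun a p => a ++ [p]) acc else acc)
      = fun acc row => acc ++ (if decide (PySem.List.len row > 4) then row else []) by
    funext acc row
    rw [PySem.List.foldl_append_singleton]
    by_cases h : PySem.List.len row > 4
    · rw [if_pos h, if_pos (decide_eq_true h)]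
    · rw [if_neg h, if_neg (by simpa [PySem.List.len_eq] using h)]
      simp]
  rw [PySem.List.foldl_append_eq_flatMap]
  rw [flatMap_ite_eq_filter_flatten]
  simp

-- ---------- B side ----------

-- pts of Source B as a named list
def ptsB (l : List (Int × Int)) : List (Int × Int) :=
  ((PySem.List.pyRange 0 (PySem.List.len l) 1).filter (keepB l (PySem.List.len l))).map
    (fun i => PySem.List.pyGetD l i pvD)

theorem alt_def (l : List (Int × Int)) :
    smoothRightBorder_alt l
      = (((cutsB (ptsB l)).zip (cutsB (ptsB l)).tail).filter (fun ab => decide (ab.2 - ab.1 > 4))).flatMap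
          (fun ab => PySem.List.slice (ptsB l) (some ab.1) (some ab.2)) := rfl

-- cut positions of Source B as a named list
def breaksB (pts : List (Int × Int)) : List Int :=
  (PySem.List.pyRange 0 (PySem.List.len pts - 1) 1).filter
    (fun j => decide (8 ≤ |(PySem.List.pyGetD pts j pvD).1 - (PySem.List.pyGetD pts (j + 1) pvD).1|))

theorem cutsB_def (pts : List (Int × Int)) :
    cutsB pts = 0 :: (breaksB pts).map (· + 1) ++ [PySem.List.len pts] := rfl

def pairSeg (pts : List (Int × Int)) (cs : List Int) : List (Int × List (Int × Int)) :=
  (cs.zip cs.tail).map (fun ab => (ab.2 - ab.1, PySem.List.slice pts (some ab.1) (some ab.2)))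

def lenSeg (s : List (Int × Int)) : Int × List (Int × Int) := ((s.length : Int), s)

theorem pairSeg_cons₂ (pts : List (Int × Int)) (a b : Int) (cs : List Int) :
    pairSeg pts (a :: b :: cs)
      = (b - a, PySem.List.slice pts (some a) (some b)) :: pairSeg pts (b :: cs) := rfl

theorem slice_cons_shift (x : Int × Int) (l : List (Int × Int)) (a b : Int) (ha : 0 ≤ a) (hb : 0 ≤ b) :
    PySem.List.slice (x :: l) (some (a + 1)) (some (b + 1)) = PySem.List.slice l (some a) (some b) := by
  rw [PySem.List.slice_toNat _ (by omega) (by omega), PySem.List.slice_toNat _ ha hb]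
  rw [show (a + 1).toNat = a.toNat + 1 by omega, show (b + 1).toNat = b.toNat + 1 by omega]
  simp [Nat.succ_sub_succ]

theorem slice_cons_zero (x : Int × Int) (l : List (Int × Int)) (b : Int) (hb : 0 ≤ b) :
    PySem.List.slice (x :: l) (some 0) (some (b + 1)) = x :: PySem.List.slice l (some 0) (some b) := by
  rw [PySem.List.slice_toNat _ le_rfl (by omega), PySem.List.slice_toNat _ le_rfl hb]
  rw [show (b + 1).toNat = b.toNat + 1 by omega]
  simp

theorem pairSeg_shift (x : Int × Int) (pts : List (Int × Int)) :
    ∀ (cs : List Int), (∀ c ∈ cs, 0 ≤ c) →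
      pairSeg (x :: pts) (cs.map (· + 1)) = pairSeg pts cs := by
  intro cs
  induction cs with
  | nil => intro _; rfl
  | cons a cs ih =>
    intro h
    cases cs with
    | nil => rfl
    | cons b cs' =>
      rw [List.map_cons, List.map_cons, pairSeg_cons₂, pairSeg_cons₂]
      have ha : 0 ≤ a := h a (by simp)
      have hb : 0 ≤ b := h b (by simp)
      rw [slice_cons_shift x pts a b ha hb]
      rw [show (b + 1 - (a + 1)) = b - a by omega]
      rw [show (b :: cs').map (· + 1) = (b + 1) :: cs'.map (· + 1) from rfl] at *
      congr 1
      exact ih (fun c hc => h c (by simp at hc ⊢; tauto))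

theorem breaks_nonneg (pts : List (Int × Int)) : ∀ c ∈ breaksB pts, 0 ≤ c := by
  intro c hc
  unfold breaksB at hc
  have := List.mem_of_mem_filter hc
  exact ((PySem.List.mem_pyRange_one).1 this).1

theorem cuts_nonneg (pts : List (Int × Int)) : ∀ c ∈ cutsB pts, 0 ≤ c := by
  intro c hc
  rw [cutsB_def] at hc
  rcases List.mem_cons.1 hc with h | h
  · omega
  rcases List.mem_append.1 h with h | h
  · obtain ⟨j, hj, rfl⟩ := List.mem_map.1 h
    have := breaks_nonneg pts j hj
    omega
  · have : c = PySem.List.len pts := by simpa using h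
    rw [this, PySem.List.len_eq]
    exact_mod_cast Nat.zero_le _

theorem segsRef_ne_nil (l : List (Int × Int)) : segsRef l ≠ [] := by
  match l with
  | [] => simp [segsRef]
  | [p] => simp [segsRef]
  | p :: q :: t =>
    by_cases hf : farB p q = true
    · simp [segsRef, hf]
    · rcases h : segsRef (q :: t) with _ | ⟨s, ss⟩ <;>
        simp [segsRef, hf, h]

-- break positions of p :: pts shift by one
theorem breaks_cons (p q : Int × Int) (t : List (Int × Int)) :
    breaksB (p :: q :: t) = (if farB p q then [0] else []) ++ (breaksB (q :: t)).map (· + 1) := by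
  have hm : PySem.List.len (p :: q :: t) - 1 = PySem.List.len (q :: t) := by
    simp [PySem.List.len_eq]
  have hm2 : PySem.List.len (q :: t) = ((t.length : Int) + 1) := by
    simp [PySem.List.len_eq]
  unfold breaksB
  rw [hm, PySem.List.pyRange_one_cons (by omega), List.filter_cons]
  have h0 : PySem.List.pyGetD (p :: q :: t) 0 pvD = p := PySem.List.pyGetD_zero_cons _ _ _
  have h1 : PySem.List.pyGetD (p :: q :: t) (0 + 1) pvD = q := by
    rw [pyGetD_cons_shift p (q :: t) 0 le_rfl]
    exact PySem.List.pyGetD_zero_cons _ _ _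
  have hrest : (PySem.List.pyRange (0 + 1) (PySem.List.len (q :: t)) 1).filter
        (fun j => decide (8 ≤ |(PySem.List.pyGetD (p :: q :: t) j pvD).1 - (PySem.List.pyGetD (p :: q :: t) (j + 1) pvD).1|))
      = (breaksB (q :: t)).map (· + 1) := by
    have hr : PySem.List.pyRange (0 + 1) (PySem.List.len (q :: t)) 1
        = (PySem.List.pyRange 0 (PySem.List.len (q :: t) - 1) 1).map (· + 1) := by
      rw [show PySem.List.len (q :: t) = (PySem.List.len (q :: t) - 1) + 1 by omega]
      rw [show ((0 : Int) + 1) = 1 by omega]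
      rw [pyRange_shift_one]
      congr 2
      omega
    rw [hr, List.filter_map]
    unfold breaksB
    congr 1
    apply List.filter_congr
    intro j hj
    have hj' := (PySem.List.mem_pyRange_one).1 hj
    simp only [Function.comp]
    rw [pyGetD_cons_shift p (q :: t) j hj'.1,
        show (j + 1 + 1) = (j + 1) + 1 by ring,
        pyGetD_cons_shift p (q :: t) (j + 1) (by omega)]
  rw [hrest, h0, h1]
  by_cases hf : farB p q = true
  · rw [if_pos (show decide (8 ≤ |p.1 - q.1|) = true from hf), if_pos hf]
    rfl
  · rw [if_neg (show ¬ decide (8 ≤ |p.1 - q.1|) = true from hf), if_neg hf]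
    rfl

theorem pairSeg_cuts : ∀ (pts : List (Int × Int)),
    pairSeg pts (cutsB pts) = (segsRef pts).map lenSeg
  | [] => by decide
  | [p] => by
    have h1 : pairSeg [p] (cutsB [p]) = [(1, PySem.List.slice [p] (some 0) (some 1))] := rfl
    have h2 : PySem.List.slice ([p] : List (Int × Int)) (some 0) (some 1) = [p] := by
      rw [PySem.List.slice_toNat _ le_rfl (by omega)]; rfl
    rw [h1, h2]
    simp [segsRef, lenSeg]
  | p :: q :: t => by
    have IH := pairSeg_cuts (q :: t)
    have hlen : PySem.List.len (p :: q :: t) = PySem.List.len (q :: t) + 1 := by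
      simp [PySem.List.len_eq]
    by_cases hf : farB p q = true
    · -- far: cuts (p::..) = 0 :: (cuts (q::t)).map (+1); first segment is [p]
      have hc : cutsB (p :: q :: t) = 0 :: (cutsB (q :: t)).map (· + 1) := by
        rw [cutsB_def, cutsB_def, breaks_cons, if_pos hf, hlen]
        simp [List.map_map]
      rw [hc]
      have hcq : ∃ r rs, cutsB (q :: t) = r :: rs := by
        rw [cutsB_def]; exact ⟨_, _, rfl⟩
      obtain ⟨r, rs, hr⟩ := hcq
      have hr0 : r = 0 := by
        rw [cutsB_def] at hr
        exact (List.cons_eq_cons.1 hr).1.symm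
      rw [hr, hr0, List.map_cons]
      rw [show ((0 : Int) + 1) = 1 from rfl]
      rw [show (0 : Int) :: (1 : Int) :: rs.map (· + 1) = 0 :: ((1 : Int) :: rs.map (· + 1)) from rfl]
      rw [pairSeg_cons₂]
      have hslice : PySem.List.slice (p :: q :: t) (some 0) (some 1) = [p] := by
        rw [PySem.List.slice_toNat _ le_rfl (by omega)]
        rfl
      have hshift : pairSeg (p :: q :: t) ((1 : Int) :: rs.map (· + 1))
          = pairSeg (q :: t) (0 :: rs) := by
        have := pairSeg_shift p (q :: t) (0 :: rs) (by
          intro c hc'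
          have : c ∈ cutsB (q :: t) := by rw [hr, hr0]; exact hc'
          exact cuts_nonneg _ _ this)
        simpa using this
      rw [hslice, hshift, show (0 : Int) :: rs = r :: rs by rw [hr0], ← hr, IH]
      have hseg : segsRef (p :: q :: t) = [p] :: segsRef (q :: t) := by
        rw [segsRef, if_pos hf]
      rw [hseg, List.map_cons]
      rfl
    · -- close: p joins the first segment
      have hfb : farB p q = false := by simpa using hf
      have hc : cutsB (p :: q :: t)
          = 0 :: ((breaksB (q :: t)).map (· + 1) ++ [PySem.List.len (q :: t)]).map (· + 1) := by
        rw [cutsB_def, breaks_cons, if_neg hf, hlen]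
        simp [List.map_map]
      -- the tail of cuts (q::t)
      set rest := (breaksB (q :: t)).map (· + 1) ++ [PySem.List.len (q :: t)] with hrest
      have hcq : cutsB (q :: t) = 0 :: rest := by rw [cutsB_def, List.cons_append, hrest]
      have hrest_ne : rest ≠ [] := by simp [hrest]
      obtain ⟨r0, rr, hr⟩ := List.exists_cons_of_ne_nil hrest_ne
      have hnn : ∀ c ∈ (0 : Int) :: rest, 0 ≤ c := by
        intro c hc'
        exact cuts_nonneg (q :: t) c (by rw [hcq]; exact hc')
      have hr0 : 0 ≤ r0 := hnn r0 (by rw [hr]; simp)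
      rw [hc, hr, List.map_cons, pairSeg_cons₂]
      have hshift : pairSeg (p :: q :: t) ((r0 + 1) :: rr.map (· + 1))
          = pairSeg (q :: t) (r0 :: rr) := by
        have := pairSeg_shift p (q :: t) (r0 :: rr) (by
          intro c hc'
          exact hnn c (by rw [hr]; exact List.mem_cons_of_mem _ hc'))
        simpa using this
      rw [hshift]
      -- use IH on cuts (q::t) = 0 :: r0 :: rr
      rw [hcq, hr] at IH
      rw [pairSeg_cons₂] at IH
      obtain ⟨s, ss, hs⟩ := List.exists_cons_of_ne_nil (segsRef_ne_nil (q :: t))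
      rw [hs, List.map_cons] at IH
      have hhead : (r0 - 0, PySem.List.slice (q :: t) (some 0) (some r0)) = lenSeg s :=
        (List.cons_eq_cons.1 IH).1
      have htail : pairSeg (q :: t) (r0 :: rr) = ss.map lenSeg :=
        (List.cons_eq_cons.1 IH).2
      have hseg : segsRef (p :: q :: t) = (p :: s) :: ss := by
        rw [segsRef, if_neg (by simp [hfb]), hs]
      rw [hseg, List.map_cons, htail]
      congr 1
      unfold lenSeg at hhead ⊢
      have h1 : r0 = (s.length : Int) := by
        have := congrArg Prod.fst hhead
        simpa using this
      have h2 : PySem.List.slice (q :: t) (some 0) (some r0) = s := by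
        have := congrArg Prod.snd hhead
        simpa using this
      rw [slice_cons_zero p (q :: t) r0 hr0, h2]
      simp
      omega

theorem filter_flatMap {α β : Type} (l : List α) (p : α → Bool) (g : α → List β) :
    (l.filter p).flatMap g = l.flatMap (fun x => if p x then g x else []) := by
  induction l with
  | nil => rfl
  | cons a t ih => by_cases h : p a <;> simp [h, ih]

-- B's port equals filter-and-flatten of the back-to-front segmentation of pts
theorem alt_eq (l : List (Int × Int)) :
    smoothRightBorder_alt l
      = ((segsRef (ptsB l)).filter (fun s => decide ((s.length : Int) > 4))).flatten := by
  rw [alt_def, filter_flatMap]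
  have h1 : ((cutsB (ptsB l)).zip (cutsB (ptsB l)).tail).flatMap
        (fun ab => if decide (ab.2 - ab.1 > 4) then PySem.List.slice (ptsB l) (some ab.1) (some ab.2) else [])
      = (pairSeg (ptsB l) (cutsB (ptsB l))).flatMap (fun cs => if decide (cs.1 > 4) then cs.2 else []) := by
    unfold pairSeg
    rw [List.flatMap_map]
  rw [h1, pairSeg_cuts, List.flatMap_map]
  have h2 : (fun s => if decide ((lenSeg s).1 > 4) then (lenSeg s).2 else [])
      = fun (s : List (Int × Int)) => if decide ((s.length : Int) > 4) then s else [] := rfl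
  rw [h2, flatMap_ite_eq_filter_flatten]

-- loopB with empty prefix computes segsRef
theorem loopB_segsRef : ∀ (t : List (Int × Int)) (row : List (Int × Int)) (a : Int × Int),
    ∃ s ss, segsRef (a :: t) = s :: ss ∧ loopB t row a = (row ++ s) :: ss := by
  intro t
  induction t with
  | nil =>
    intro row a
    exact ⟨[a], [], by simp [segsRef], by simp [loopB]⟩
  | cons p t' IH =>
    intro row a
    by_cases hc : closeP a p
    · obtain ⟨s, ss, hseg, hloop⟩ := IH (row ++ [a]) p
      refine ⟨a :: s, ss, ?_, ?_⟩
      · rw [segsRef, if_neg (by rw [Bool.not_eq_true, farB_false_iff]; exact hc), hseg]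
      · rw [loopB, if_pos hc, hloop]
        simp
    · obtain ⟨s, ss, hseg, hloop⟩ := IH [] p
      refine ⟨[a], s :: ss, ?_, ?_⟩
      · have hft : farB a p = true := by
          by_contra hx
          exact hc ((farB_false_iff a p).1 (by simpa using hx))
        rw [segsRef, if_pos hft, hseg]
      · rw [loopB, if_neg hc, hloop]
        simp

-- correspondence: loopB = loopA plus possibly one trailing singleton segment
theorem loopB_eq_loopA_extra : ∀ (t : List (Int × Int)) (a b : Int × Int) (row : List (Int × Int)),
    ∃ e, loopB (b :: t) row a = loopA (a :: b :: t) row ++ e ∧ (e = [] ∨ ∃ x, e = [[x]]) := by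
  intro t
  induction t with
  | nil =>
    intro a b row
    by_cases hc : closeP a b
    · exact ⟨[], by simp [loopB, loopA, if_pos hc], Or.inl rfl⟩
    · exact ⟨[[b]], by simp [loopB, loopA, if_neg hc], Or.inr ⟨b, rfl⟩⟩
  | cons c t IH =>
    intro a b row
    by_cases hc : closeP a b
    · obtain ⟨e, he, hshape⟩ := IH b c (row ++ [a])
      refine ⟨e, ?_, hshape⟩
      rw [loopB, if_pos hc, loopA, if_pos hc]
      exact he
    · obtain ⟨e, he, hshape⟩ := IH b c []
      refine ⟨e, ?_, hshape⟩
      rw [loopB, if_neg hc, loopA, if_neg hc, he]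
      simp

-- the two segmentations agree after dropping short segments
theorem segsRef_filter_flatten (pts : List (Int × Int)) :
    ((segsRef pts).filter (fun s => decide ((s.length : Int) > 4))).flatten
      = ((loopA pts []).filter (fun s => decide ((s.length : Int) > 4))).flatten := by
  cases pts with
  | nil => simp [segsRef, loopA]
  | cons a t =>
    cases t with
    | nil => simp [segsRef, loopA]
    | cons b t' =>
      obtain ⟨s, ss, hseg, hloop⟩ := loopB_segsRef (b :: t') [] a
      obtain ⟨e, he, hshape⟩ := loopB_eq_loopA_extra t' a b []
      rw [hseg, show s :: ss = ([] ++ s) :: ss by simp, ← hloop, he,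
          List.filter_append, List.flatten_append]
      rcases hshape with rfl | ⟨x, rfl⟩
      · simp
      · simp

-- ---------- first stage: the keep-filter equals A's three-block construction ----------

def midP (l : List (Int × Int)) (i : Int) : Bool :=
  decide (¬((PySem.List.pyGetD l i pvD).1 > (PySem.List.pyGetD l (i - 1) pvD).1 + 1 ∧
            (PySem.List.pyGetD l i pvD).1 > (PySem.List.pyGetD l (i + 1) pvD).1 + 1) ∧
          ¬((PySem.List.pyGetD l i pvD).1 < (PySem.List.pyGetD l (i - 1) pvD).1 - 1 ∧
            (PySem.List.pyGetD l i pvD).1 < (PySem.List.pyGetD l (i + 1) pvD).1 - 1))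

theorem stepM_if (l : List (Int × Int)) :
    stepM l = fun acc i => if midP l i then acc ++ [PySem.List.pyGetD l i pvD] else acc := by
  funext acc i
  unfold stepM midP
  by_cases h1 : (PySem.List.pyGetD l i pvD).1 > (PySem.List.pyGetD l (i - 1) pvD).1 + 1 ∧
      (PySem.List.pyGetD l i pvD).1 > (PySem.List.pyGetD l (i + 1) pvD).1 + 1
  · simp [h1]
  · by_cases h2 : (PySem.List.pyGetD l i pvD).1 < (PySem.List.pyGetD l (i - 1) pvD).1 - 1 ∧
        (PySem.List.pyGetD l i pvD).1 < (PySem.List.pyGetD l (i + 1) pvD).1 - 1 <;>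
      simp [h1, h2]

theorem mid_fold (l : List (Int × Int)) (init : List (Int × Int)) :
    (PySem.List.pyRange 1 (PySem.List.len l - 1) 1).foldl (stepM l) init
      = init ++ ((PySem.List.pyRange 1 (PySem.List.len l - 1) 1).filter (midP l)).map
          (fun i => PySem.List.pyGetD l i pvD) := by
  rw [stepM_if]
  exact PySem.List.foldl_append_if _ _ _ _

theorem ptsB_eq_stage1A (l : List (Int × Int)) (h : 2 ≤ l.length) :
    ptsB l = stage1A l := by
  have hn : PySem.List.len l = (l.length : Int) := PySem.List.len_eq l
  have h2 : (2 : Int) ≤ PySem.List.len l := by rw [hn]; exact_mod_cast h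
  have hsplit : PySem.List.pyRange 0 (PySem.List.len l) 1
      = [0] ++ PySem.List.pyRange 1 (PySem.List.len l - 1) 1 ++ [PySem.List.len l - 1] := by
    have e1 : PySem.List.pyRange 0 (PySem.List.len l) 1
        = PySem.List.pyRange 0 (PySem.List.len l - 1) 1 ++ PySem.List.pyRange (PySem.List.len l - 1) (PySem.List.len l) 1 :=
      PySem.List.pyRange_one_append 0 (PySem.List.len l - 1) (PySem.List.len l) (by omega) (by omega)
    have e2 : PySem.List.pyRange 0 (PySem.List.len l - 1) 1
        = PySem.List.pyRange 0 1 1 ++ PySem.List.pyRange 1 (PySem.List.len l - 1) 1 :=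
      PySem.List.pyRange_one_append 0 1 (PySem.List.len l - 1) (by omega) (by omega)
    have e3 : PySem.List.pyRange 0 1 1 = [0] := by decide
    have e4 : PySem.List.pyRange (PySem.List.len l - 1) (PySem.List.len l) 1 = [PySem.List.len l - 1] := by
      have h5 := PySem.List.pyRange_one_singleton (PySem.List.len l - 1)
      rw [show PySem.List.len l - 1 + 1 = PySem.List.len l by omega] at h5
      exact h5
    rw [e1, e2, e3, e4]
  unfold ptsB
  rw [hsplit, List.filter_append, List.filter_append, List.map_append, List.map_append]
  -- head block
  have hhead : (([0] : List Int).filter (keepB l (PySem.List.len l))).map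
        (fun i => PySem.List.pyGetD l i pvD) = headA l := by
    have hk : keepB l (PySem.List.len l) 0
        = decide ((PySem.List.pyGetD l 1 pvD).1 + 1 < (PySem.List.pyGetD l 0 pvD).1 ∧
                  (PySem.List.pyGetD l 0 pvD).1 < (PySem.List.pyGetD l 1 pvD).1 + 8) := by
      unfold keepB
      rw [if_pos rfl]
    unfold headA
    by_cases hcond : (PySem.List.pyGetD l 0 pvD).1 < (PySem.List.pyGetD l 1 pvD).1 + 8 ∧
        (PySem.List.pyGetD l 0 pvD).1 > (PySem.List.pyGetD l 1 pvD).1 + 1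
    · rw [if_pos hcond]
      have hkt : keepB l (PySem.List.len l) 0 = true := by
        rw [hk]; exact decide_eq_true ⟨hcond.2, hcond.1⟩
      rw [List.filter_cons, if_pos hkt, List.filter_nil]
      rfl
    · rw [if_neg hcond]
      have hkf : keepB l (PySem.List.len l) 0 = false := by
        rw [hk, decide_eq_false_iff_not]
        intro hcc
        exact hcond ⟨hcc.2, hcc.1⟩
      rw [List.filter_cons, if_neg (by rw [Bool.not_eq_true]; exact hkf), List.filter_nil]
      rfl
  -- middle block
  have hmid : (PySem.List.pyRange 1 (PySem.List.len l - 1) 1).filter (keepB l (PySem.List.len l))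
      = (PySem.List.pyRange 1 (PySem.List.len l - 1) 1).filter (midP l) := by
    apply List.filter_congr
    intro i hi
    have hi' := (PySem.List.mem_pyRange_one).1 hi
    unfold keepB midP
    rw [if_neg (by omega), if_neg (by omega)]
  -- tail block
  have htail : (([PySem.List.len l - 1] : List Int).filter (keepB l (PySem.List.len l))).map
        (fun i => PySem.List.pyGetD l i pvD)
      = if (PySem.List.pyGetD l (PySem.List.len l - 1) pvD).1 < (PySem.List.pyGetD l (PySem.List.len l - 2) pvD).1 + 8 ∧
           (PySem.List.pyGetD l (PySem.List.len l - 1) pvD).1 > (PySem.List.pyGetD l (PySem.List.len l - 2) pvD).1 - 1 then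
          [PySem.List.pyGetD l (PySem.List.len l - 1) pvD] else [] := by
    have hk : keepB l (PySem.List.len l) (PySem.List.len l - 1)
        = decide ((PySem.List.pyGetD l (PySem.List.len l - 2) pvD).1 - 1 < (PySem.List.pyGetD l (PySem.List.len l - 1) pvD).1 ∧
                  (PySem.List.pyGetD l (PySem.List.len l - 1) pvD).1 < (PySem.List.pyGetD l (PySem.List.len l - 2) pvD).1 + 8) := by
      unfold keepB
      rw [if_neg (by omega), if_pos rfl]
    by_cases hcond : (PySem.List.pyGetD l (PySem.List.len l - 1) pvD).1 < (PySem.List.pyGetD l (PySem.List.len l - 2) pvD).1 + 8 ∧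
        (PySem.List.pyGetD l (PySem.List.len l - 1) pvD).1 > (PySem.List.pyGetD l (PySem.List.len l - 2) pvD).1 - 1
    · rw [if_pos hcond]
      have hkt : keepB l (PySem.List.len l) (PySem.List.len l - 1) = true := by
        rw [hk]; exact decide_eq_true ⟨hcond.2, hcond.1⟩
      rw [List.filter_cons, if_pos hkt, List.filter_nil]
      rfl
    · rw [if_neg hcond]
      have hkf : keepB l (PySem.List.len l) (PySem.List.len l - 1) = false := by
        rw [hk, decide_eq_false_iff_not]
        intro hcc
        exact hcond ⟨hcc.2, hcc.1⟩
      rw [List.filter_cons, if_neg (by rw [Bool.not_eq_true]; exact hkf), List.filter_nil]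
      rfl
  rw [hhead, hmid, htail]
  unfold stage1A
  rw [mid_fold]
  by_cases hcond : (PySem.List.pyGetD l (PySem.List.len l - 1) pvD).1 < (PySem.List.pyGetD l (PySem.List.len l - 2) pvD).1 + 8 ∧
      (PySem.List.pyGetD l (PySem.List.len l - 1) pvD).1 > (PySem.List.pyGetD l (PySem.List.len l - 2) pvD).1 - 1
  · simp only [if_pos hcond]
  · simp only [if_neg hcond]
    simp

-- ===== VERDICT (by name: the statement is the Claim_ definition above) =====
theorem smoothRightBorder_spec : Claim_equal_smoothRightBorder := by
  intro l _ hpre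
  unfold Spec_smoothRightBorder
  have hpred : (fun r : List (Int × Int) => decide (PySem.List.len r > 4))
      = (fun r : List (Int × Int) => decide ((r.length : Int) > 4)) := by
    funext r
    rw [PySem.List.len_eq]
  rw [smoothRightBorder_def, smoothSideBorderA_eq, alt_eq, segsRef_filter_flatten,
      ptsB_eq_stage1A l hpre, hpred]
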